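-- pv_equiv track=rewrite | github.com/mathieu-genete/NGSgenotyp | tools/kmerRefFilter-1.5/kmerRefFilter.py | NbrSuccessifBase
-- ===== SOURCE A (Python) =====
-- def NbrSuccessifBase(base,seq):
--     l = len(seq)
--     while l>0:
--         q=str(base)*l
--         nbr = seq.count(q)
--         if nbr>1:
--             return l
--         l-= 1
--     return 0
-- ===== SOURCE B (Python) =====
-- def NbrSuccessifBase(base, seq):
--     # Binary search for the largest l with at least two disjoint occurrences of base*l.
--     # seq.count(base*l) > 1 is monotone (decreasing) in l, so binary search is exact.
--     lo, hi = 0, len(seq)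
--     while lo < hi:
--         mid = (lo + hi + 1) // 2
--         if seq.count(str(base) * mid) > 1:
--             lo = mid
--         else:
--             hi = mid - 1
--     return lo
-- ===== Notes on version B (the rewrite author's own statement) =====
-- stated objective: faster
-- what changed: Replaces the linear descent over all candidate lengths l (one seq.count per l) by a binary search over l, using that 'seq.count(base*l) > 1' is monotone decreasing in l.
import Mathlib
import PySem

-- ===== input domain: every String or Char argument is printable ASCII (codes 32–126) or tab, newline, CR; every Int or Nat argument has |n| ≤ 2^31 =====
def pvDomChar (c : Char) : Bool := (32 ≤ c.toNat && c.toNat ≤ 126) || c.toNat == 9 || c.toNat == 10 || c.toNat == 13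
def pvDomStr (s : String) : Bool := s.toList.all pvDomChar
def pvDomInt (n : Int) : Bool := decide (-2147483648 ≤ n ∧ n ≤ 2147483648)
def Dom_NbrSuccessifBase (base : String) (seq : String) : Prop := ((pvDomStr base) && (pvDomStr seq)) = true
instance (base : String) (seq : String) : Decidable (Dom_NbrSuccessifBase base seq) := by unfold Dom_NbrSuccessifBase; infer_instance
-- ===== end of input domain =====

-- B replaces A's linear descent over candidate lengths by a binary search over the
-- length (the test "seq.count(base*l) > 1" is monotone decreasing in l): faster.

-- ===== PORT A =====
-- while l > 0: q = str(base)*l; if seq.count(q) > 1: return l; l -= 1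
def pvGoA (b s : List Char) : Nat → Int
  | 0 => 0
  | l + 1 =>
    let q := PySem.List.pyRepeat b ((l + 1 : Nat) : Int)
    if PySem.Chars.count s q > 1 then ((l + 1 : Nat) : Int) else pvGoA b s l

def NbrSuccessifBase (base : String) (seq : String) : Int :=
  pvGoA base.toList seq.toList seq.toList.length

-- ===== PORT B =====
def pvOk (b s : List Char) (l : Int) : Bool :=
  decide (PySem.Chars.count s (PySem.List.pyRepeat b l) > 1)

-- mid = (lo+hi+1)//2 lies strictly above lo and at most hi (cited by decreasing_by)
theorem pvMidBounds (lo hi : Int) (h : lo < hi) :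
    lo + 1 ≤ PySem.Int.floordiv (lo + hi + 1) 2 ∧ PySem.Int.floordiv (lo + hi + 1) 2 ≤ hi := by
  constructor
  · rw [PySem.Int.le_floordiv_iff_mul_le (by norm_num)]; omega
  · have : PySem.Int.floordiv (lo + hi + 1) 2 < hi + 1 := by
      rw [PySem.Int.floordiv_lt_iff_lt_mul (by norm_num)]; omega
    omega

-- while lo < hi: mid = (lo+hi+1)//2; if seq.count(str(base)*mid) > 1: lo = mid else: hi = mid-1
def pvGoB (b s : List Char) (lo hi : Int) : Int :=
  if h : lo < hi then
    let mid := PySem.Int.floordiv (lo + hi + 1) 2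
    if pvOk b s mid then pvGoB b s mid hi else pvGoB b s lo (mid - 1)
  else lo
termination_by (hi - lo).toNat
decreasing_by
  · have := pvMidBounds lo hi h; omega
  · have := pvMidBounds lo hi h; omega

def NbrSuccessifBase_alt (base : String) (seq : String) : Int :=
  pvGoB base.toList seq.toList 0 (seq.toList.length : Int)

-- ===== PRECONDITION & SPEC =====
def Spec_NbrSuccessifBase (base : String) (seq : String) (out : Int) : Prop := out = NbrSuccessifBase_alt base seq
instance (base : String) (seq : String) (out : Int) : Decidable (Spec_NbrSuccessifBase base seq out) := by unfold Spec_NbrSuccessifBase; infer_instance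

-- ===== CLAIM (what is proved, stated in full; the proofs are below) =====
def Claim_equal_NbrSuccessifBase : Prop := ∀ (base : String) (seq : String), Dom_NbrSuccessifBase base seq → Spec_NbrSuccessifBase base seq (NbrSuccessifBase base seq)

-- ===== LEMMAS AND PROOFS =====

-- greedy non-overlapping occurrence counter (the fuel-free shape of PySem.Chars.count.go)
def pvG (sub : List Char) : List Char → Nat
  | [] => 0
  | c :: t =>
    if h : sub.isPrefixOf (c :: t) = true ∧ sub ≠ [] then
      1 + pvG sub (List.drop sub.length (c :: t))
    else pvG sub t
termination_by l => l.length
decreasing_by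
  · have hlen : 1 ≤ sub.length := by
      cases sub with
      | nil => exact absurd rfl h.2
      | cons a u => simp
    simp [List.length_drop]; omega
  · simp

theorem pvCountGo_eq (sub : List Char) (hsub : sub ≠ []) :
    ∀ (fuel : Nat) (l : List Char) (acc : Nat), l.length ≤ fuel →
      PySem.Chars.count.go sub fuel l acc = acc + pvG sub l := by
  have hm : 1 ≤ sub.length := by cases sub with
    | nil => exact absurd rfl hsub
    | cons a u => simp
  intro fuel
  induction fuel with
  | zero =>
    intro l acc hl
    have hnil : l = [] := List.eq_nil_of_length_eq_zero (by omega)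
    subst hnil
    rw [PySem.Chars.count.go]
    simp [pvG]
  | succ f ih =>
    intro l acc hl
    cases l with
    | nil =>
      rw [PySem.Chars.count.go] <;> simp [pvG]
    | cons c t =>
      rw [PySem.Chars.count.go]
      by_cases hp : sub.isPrefixOf (c :: t) = true
      · rw [if_pos hp]
        rw [ih (List.drop sub.length (c :: t)) (acc + 1) (by simp at hl ⊢; omega)]
        conv_rhs => rw [pvG]
        rw [dif_pos ⟨hp, hsub⟩]
        omega
      · rw [if_neg hp]
        rw [ih t acc (by simp at hl ⊢; omega)]
        conv_rhs => rw [pvG]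
        rw [dif_neg (by tauto)]

theorem pvCount_eq (sub s : List Char) (hsub : sub ≠ []) :
    PySem.Chars.count s sub = pvG sub s := by
  have he : sub.isEmpty = false := by simp [hsub]
  rw [PySem.Chars.count, he]
  simpa using pvCountGo_eq sub hsub s.length s 0 le_rfl

theorem pvG_one_iff (sub : List Char) (hsub : sub ≠ []) (l : List Char) :
    1 ≤ pvG sub l ↔ ∃ i, sub.isPrefixOf (List.drop i l) = true := by
  induction l using pvG.induct sub with
  | case1 =>
    rw [pvG]
    simp only [List.drop_nil]
    simp [List.isPrefixOf_iff_prefix, List.prefix_nil, hsub]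
  | case2 c t h ih =>
    rw [pvG, dif_pos h]
    constructor
    · intro _; exact ⟨0, h.1⟩
    · intro _; omega
  | case3 c t h ih =>
    rw [pvG, dif_neg h]
    rw [ih]
    constructor
    · rintro ⟨i, hi⟩
      exact ⟨i + 1, by simpa [List.drop_succ_cons] using hi⟩
    · rintro ⟨i, hi⟩
      cases i with
      | zero => exact absurd ⟨by simpa using hi, hsub⟩ h
      | succ i' => exact ⟨i', by simpa [List.drop_succ_cons] using hi⟩

theorem pvG_two_iff (sub : List Char) (hsub : sub ≠ []) (l : List Char) :
    2 ≤ pvG sub l ↔ ∃ i j, i + sub.length ≤ j ∧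
      sub.isPrefixOf (List.drop i l) = true ∧ sub.isPrefixOf (List.drop j l) = true := by
  induction l using pvG.induct sub with
  | case1 =>
    rw [pvG]
    simp only [List.drop_nil]
    simp [List.isPrefixOf_iff_prefix, List.prefix_nil, hsub]
  | case2 c t h ih =>
    rw [pvG, dif_pos h]
    have h1 : (2 ≤ 1 + pvG sub (List.drop sub.length (c :: t))) ↔
        1 ≤ pvG sub (List.drop sub.length (c :: t)) := by omega
    rw [h1, pvG_one_iff sub hsub]
    constructor
    · rintro ⟨i, hi⟩
      rw [List.drop_drop] at hi
      exact ⟨0, sub.length + i, by omega, by simpa using h.1, hi⟩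
    · rintro ⟨i, j, hij, hi, hj⟩
      refine ⟨j - sub.length, ?_⟩
      rw [List.drop_drop]
      have heq : sub.length + (j - sub.length) = j := by omega
      rwa [heq]
  | case3 c t h ih =>
    rw [pvG, dif_neg h]
    rw [ih]
    constructor
    · rintro ⟨i, j, hij, hi, hj⟩
      exact ⟨i + 1, j + 1, by omega,
        by simpa [List.drop_succ_cons] using hi,
        by simpa [List.drop_succ_cons] using hj⟩
    · rintro ⟨i, j, hij, hi, hj⟩
      have hm : 1 ≤ sub.length := by cases sub with
        | nil => exact absurd rfl hsub
        | cons a u => simp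
      cases i with
      | zero => exact absurd ⟨by simpa using hi, hsub⟩ h
      | succ i' =>
        cases j with
        | zero => omega
        | succ j' =>
          exact ⟨i', j', by omega,
            by simpa [List.drop_succ_cons] using hi,
            by simpa [List.drop_succ_cons] using hj⟩

theorem pvG_mono (q q' s : List Char) (hq : q ≠ []) (hpre : q <+: q')
    (h2 : 2 ≤ pvG q' s) : 2 ≤ pvG q s := by
  have hq' : q' ≠ [] := by
    intro hnil; subst hnil
    exact hq (List.prefix_nil.mp hpre)
  rw [pvG_two_iff q' hq'] at h2
  rw [pvG_two_iff q hq]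
  obtain ⟨i, j, hij, hi, hj⟩ := h2
  have hlen : q.length ≤ q'.length := hpre.length_le
  refine ⟨i, j, by omega, ?_, ?_⟩
  · rw [List.isPrefixOf_iff_prefix] at hi ⊢
    exact hpre.trans hi
  · rw [List.isPrefixOf_iff_prefix] at hj ⊢
    exact hpre.trans hj

theorem pvOk_mono (b s : List Char) (l : Int) (hl : 1 ≤ l)
    (h : pvOk b s (l + 1) = true) : pvOk b s l = true := by
  by_cases hb : b = []
  · subst hb
    have hrep : ∀ m : Int, PySem.List.pyRepeat ([] : List Char) m = [] := by
      intro m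
      simp only [PySem.List.pyRepeat]
      exact List.flatten_replicate_nil
    rw [pvOk, hrep] at h ⊢
    exact h
  · have hk : (l + 1).toNat = l.toNat + 1 := by omega
    have hrep : PySem.List.pyRepeat b (l + 1) = PySem.List.pyRepeat b l ++ b := by
      simp only [PySem.List.pyRepeat, hk, List.replicate_succ', List.flatten_append]
      simp
    have hq : PySem.List.pyRepeat b l ≠ [] := by
      obtain ⟨k', hk'⟩ : ∃ k', l.toNat = k' + 1 := ⟨l.toNat - 1, by omega⟩
      simp only [PySem.List.pyRepeat, hk', List.replicate_succ, List.flatten_cons]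
      intro hc
      exact hb (List.append_eq_nil_iff.mp hc).1
    rw [pvOk, decide_eq_true_iff] at h ⊢
    have h2 : 2 ≤ PySem.Chars.count s (PySem.List.pyRepeat b (l + 1)) := h
    rw [pvCount_eq _ _ (by rw [hrep]; exact fun hc => hq (List.append_eq_nil_iff.mp hc).1)] at h2
    have := pvG_mono (PySem.List.pyRepeat b l) (PySem.List.pyRepeat b (l + 1)) s hq
      (by rw [hrep]; exact ⟨b, rfl⟩) h2
    rw [pvCount_eq _ _ hq]
    omega

theorem pvOk_antitone (b s : List Char) (m k : Int) (hm : 1 ≤ m) (hmk : m ≤ k)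
    (h : pvOk b s k = true) : pvOk b s m = true := by
  induction k, hmk using Int.le_induction with
  | base => exact h
  | succ k hk ih => exact ih (pvOk_mono b s k (by omega) h)

theorem pvSpecA (b s : List Char) (n : Nat) :
    (pvGoA b s n = 0 ∨ (1 ≤ pvGoA b s n ∧ pvOk b s (pvGoA b s n) = true)) ∧
    0 ≤ pvGoA b s n ∧ pvGoA b s n ≤ (n : Int) ∧
    ∀ k : Int, pvGoA b s n < k → k ≤ (n : Int) → pvOk b s k = false := by
  induction n with
  | zero =>
    refine ⟨Or.inl rfl, by simp [pvGoA], by simp [pvGoA], ?_⟩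
    intro k h1 h2
    simp [pvGoA] at h1
    omega
  | succ n ih =>
    by_cases hc : PySem.Chars.count s (PySem.List.pyRepeat b ((n + 1 : Nat) : Int)) > 1
    · have hr : pvGoA b s (n + 1) = ((n + 1 : Nat) : Int) := by
        rw [pvGoA, if_pos hc]
      rw [hr]
      refine ⟨Or.inr ⟨by push_cast; omega, ?_⟩, by positivity, le_rfl, ?_⟩
      · simp only [pvOk]
        rw [decide_eq_true_iff]
        exact hc
      intro k h1 h2
      omega
    · have hr : pvGoA b s (n + 1) = pvGoA b s n := by
        rw [pvGoA, if_neg hc]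
      obtain ⟨ih1, ih2, ih3, ih4⟩ := ih
      rw [hr]
      refine ⟨ih1, ih2, by push_cast at *; omega, ?_⟩
      intro k h1 h2
      by_cases hk : k ≤ (n : Int)
      · exact ih4 k h1 hk
      · have hk1 : k = ((n + 1 : Nat) : Int) := by push_cast at h1 h2 hk ⊢; omega
        subst hk1
        simp only [pvOk]
        rw [decide_eq_false_iff_not]
        exact hc

theorem pvSpecB (b s : List Char) (n : Nat) (lo hi : Int) :
    0 ≤ lo → lo ≤ hi → hi ≤ (n : Int) →
    (lo = 0 ∨ (1 ≤ lo ∧ pvOk b s lo = true)) →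
    (∀ k : Int, hi < k → k ≤ (n : Int) → pvOk b s k = false) →
    (pvGoB b s lo hi = 0 ∨ (1 ≤ pvGoB b s lo hi ∧ pvOk b s (pvGoB b s lo hi) = true)) ∧
    0 ≤ pvGoB b s lo hi ∧ pvGoB b s lo hi ≤ (n : Int) ∧
    ∀ k : Int, pvGoB b s lo hi < k → k ≤ (n : Int) → pvOk b s k = false := by
  induction lo, hi using pvGoB.induct b s with
  | case1 lo hi h mid hok ih =>
    intro h0 hlh hhn hlow hup
    have hmid : mid = PySem.Int.floordiv (lo + hi + 1) 2 := rfl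
    have hmb := pvMidBounds lo hi h
    rw [← hmid] at hmb
    have hr : pvGoB b s lo hi =
        if pvOk b s mid then pvGoB b s mid hi else pvGoB b s lo (mid - 1) := by
      rw [pvGoB, dif_pos h]
    rw [hr, if_pos hok]
    exact ih (by omega) (by omega) hhn (Or.inr ⟨by omega, hok⟩) hup
  | case2 lo hi h mid hok ih =>
    intro h0 hlh hhn hlow hup
    have hmid : mid = PySem.Int.floordiv (lo + hi + 1) 2 := rfl
    have hmb := pvMidBounds lo hi h
    rw [← hmid] at hmb
    have hok' : pvOk b s mid = false := by simpa using hok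
    have hr : pvGoB b s lo hi =
        if pvOk b s mid then pvGoB b s mid hi else pvGoB b s lo (mid - 1) := by
      rw [pvGoB, dif_pos h]
    rw [hr, if_neg hok]
    refine ih (by omega) (by omega) (by omega) hlow ?_
    intro k h1 h2
    cases hk : pvOk b s k with
    | false => rfl
    | true =>
      have := pvOk_antitone b s mid k (by omega) (by omega) hk
      rw [this] at hok'
      exact hok'
  | case3 lo hi h =>
    intro h0 hlh hhn hlow hup
    have hr : pvGoB b s lo hi = lo := by
      rw [pvGoB, dif_neg h]
    rw [hr]
    have : lo = hi := by omega
    subst this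
    exact ⟨hlow, h0, hhn, hup⟩

theorem pvUnique (b s : List Char) (n : Nat) (r r' : Int)
    (H1 : r = 0 ∨ (1 ≤ r ∧ pvOk b s r = true)) (H2 : 0 ≤ r) (H3 : r ≤ (n : Int))
    (H4 : ∀ k : Int, r < k → k ≤ (n : Int) → pvOk b s k = false)
    (H1' : r' = 0 ∨ (1 ≤ r' ∧ pvOk b s r' = true)) (H2' : 0 ≤ r') (H3' : r' ≤ (n : Int))
    (H4' : ∀ k : Int, r' < k → k ≤ (n : Int) → pvOk b s k = false) : r = r' := by
  rcases lt_trichotomy r r' with h | h | h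
  · have hf := H4 r' h H3'
    rcases H1' with h0 | ⟨_, ht⟩
    · omega
    · rw [ht] at hf; exact absurd hf (by simp)
  · exact h
  · have hf := H4' r h H3
    rcases H1 with h0 | ⟨_, ht⟩
    · omega
    · rw [ht] at hf; exact absurd hf (by simp)

-- ===== VERDICT (by name: the statement is the Claim_ definition above) =====
theorem NbrSuccessifBase_spec : Claim_equal_NbrSuccessifBase := by
  intro base seq _
  unfold Spec_NbrSuccessifBase NbrSuccessifBase NbrSuccessifBase_alt
  set b := base.toList
  set s := seq.toList
  set n := s.length
  obtain ⟨A1, A2, A3, A4⟩ := pvSpecA b s n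
  obtain ⟨B1, B2, B3, B4⟩ := pvSpecB b s n 0 (n : Int) le_rfl (by omega) le_rfl (Or.inl rfl)
    (by intro k h1 h2; omega)
  exact pvUnique b s n _ _ A1 A2 A3 A4 B1 B2 B3 B4
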